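-- pv_equiv track=rewrite | github.com/neurorishika/multi-animal-tracker | src/multi_tracker/core/identity/runtime_utils.py | _parse_runtime_request
-- ===== SOURCE A (Python) =====
-- from typing import Any, Dict, List, Optional, Sequence, Tuple
--
-- def _parse_runtime_request(requested: str) -> Tuple[str, Optional[str]]:
--     """Parse runtime request string into (flavor, device)."""
--     req = str(requested or "auto").strip().lower()
--     req = req.replace("-", "_").replace(" ", "_")
--     if req in {"", "auto"}:
--         return "auto", None
--
--     if req in {"native", "onnx", "tensorrt"}:
--         return req, None
--
--     for prefix in ("native", "onnx", "tensorrt"):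
--         token = f"{prefix}_"
--         if req.startswith(token):
--             suffix = req[len(token) :]
--             if suffix in {"cpu", "mps"}:
--                 return prefix, suffix
--             if suffix in {"cuda", "rocm"}:
--                 return prefix, "cuda:0"
--             return prefix, None
--
--     return "native", None
-- ===== SOURCE B (Python) =====
-- _FLAVORS = ("native", "onnx", "tensorrt")
--
-- # Exhaustive precomputed table of every exactly-recognized request string.
-- _TABLE = {"": ("auto", None), "auto": ("auto", None)}
-- for _f in _FLAVORS:
--     _TABLE[_f] = (_f, None)
--     for _s, _d in (("cpu", "cpu"), ("mps", "mps"), ("cuda", "cuda:0"), ("rocm", "cuda:0")):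
--         _TABLE[_f + "_" + _s] = (_f, _d)
--
-- def _parse_runtime_request(requested):
--     """Parse runtime request string into (flavor, device)."""
--     req = str(requested or "auto").strip().lower()
--     req = req.replace("-", "_").replace(" ", "_")
--     try:
--         return _TABLE[req]
--     except KeyError:
--         head = req.split("_", 1)[0]
--         return (head if head in _FLAVORS else "native"), None
-- ===== Notes on version B (the rewrite author's own statement) =====
-- stated objective: simpler
-- what changed: Replaces A's exact-match branch and startswith/slicing prefix loop with one precomputed lookup table enumerating every exactly-recognized request string, plus a small head-before-first-underscore fallback for unrecognized strings.
import Mathlib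
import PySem

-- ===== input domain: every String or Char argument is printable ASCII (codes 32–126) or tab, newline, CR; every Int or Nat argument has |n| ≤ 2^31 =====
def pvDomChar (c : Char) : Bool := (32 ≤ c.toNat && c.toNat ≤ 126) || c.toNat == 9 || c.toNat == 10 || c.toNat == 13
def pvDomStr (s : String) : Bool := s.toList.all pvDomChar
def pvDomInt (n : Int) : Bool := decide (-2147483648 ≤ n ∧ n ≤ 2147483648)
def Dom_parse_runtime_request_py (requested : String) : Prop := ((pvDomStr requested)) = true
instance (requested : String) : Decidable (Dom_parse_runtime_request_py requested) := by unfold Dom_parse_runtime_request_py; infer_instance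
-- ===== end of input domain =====

-- B replaces A's exact-match branches and startswith/slicing prefix loop by a single
-- precomputed lookup table of all 14 exactly-recognized request strings, with a small
-- head-classification fallback for unrecognized strings (objective: simpler).


-- ===== PORT A =====
-- the 'for prefix in ("native", "onnx", "tensorrt")' loop, returning on the first matching token
def pvLoopA (req : String) : List String → String × Option String
  | [] => ("native", none)
  | p :: rest =>
    let token := p ++ "_"
    if PySem.Str.startswith req token then
      let suffix := PySem.Str.slice req (some (PySem.Str.len token)) none
      if suffix == "cpu" || suffix == "mps" then (p, some suffix)
      else if suffix == "cuda" || suffix == "rocm" then (p, some "cuda:0")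
      else (p, none)
    else pvLoopA req rest

-- the branch structure of A after normalization (the normalization itself stays in the port)
def pvDispatchA (req : String) : String × Option String :=
  if req == "" || req == "auto" then ("auto", none)
  else if req == "native" || req == "onnx" || req == "tensorrt" then (req, none)
  else pvLoopA req ["native", "onnx", "tensorrt"]

def parse_runtime_request_py (requested : String) : String × Option String :=
  let req0 := if requested == "" then "auto" else requested
  let req1 := PySem.Str.lower (PySem.Str.strip req0)
  let req := PySem.Str.replace (PySem.Str.replace req1 "-" "_") " " "_"
  pvDispatchA req

-- ===== PORT B =====
-- the module-level table-building loops of Source B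
def pvFlavors : List String := ["native", "onnx", "tensorrt"]
def pvSuffixPairs : List (String × String) :=
  [("cpu", "cpu"), ("mps", "mps"), ("cuda", "cuda:0"), ("rocm", "cuda:0")]
def pvTable : PySem.Dict String (String × Option String) :=
  pvFlavors.foldl
    (fun d f =>
      pvSuffixPairs.foldl
        (fun d2 sd => d2.insert (f ++ "_" ++ sd.1) (f, some sd.2))
        (d.insert f (f, none)))
    (PySem.Dict.ofList [("", ("auto", none)), ("auto", ("auto", none))])

-- the try: table[req] / except KeyError: fallback of B (lookup hit or head classification)
def pvLookupB (req : String) : String × Option String :=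
  match pvTable.get? req with
  | some v => v
  | none =>
    -- req.split("_", 1)[0]: the text before the first '_' (hand port, exact for a 1-char sep)
    let head := String.ofList (req.toList.takeWhile (fun c => !(c == '_')))
    ((if head == "native" || head == "onnx" || head == "tensorrt" then head else "native"), none)

def parse_runtime_request_py_alt (requested : String) : String × Option String :=
  let req0 := if requested == "" then "auto" else requested
  let req1 := PySem.Str.lower (PySem.Str.strip req0)
  let req := PySem.Str.replace (PySem.Str.replace req1 "-" "_") " " "_"
  pvLookupB req

-- ===== PRECONDITION & SPEC =====
def Spec_parse_runtime_request_py (requested : String) (out : String × Option String) : Prop := out = parse_runtime_request_py_alt requested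
instance (requested : String) (out : String × Option String) : Decidable (Spec_parse_runtime_request_py requested out) := by unfold Spec_parse_runtime_request_py; infer_instance

-- ===== CLAIM (what is proved, stated in full; the proofs are below) =====
def Claim_equal_parse_runtime_request_py : Prop := ∀ (requested : String), Dom_parse_runtime_request_py requested → Spec_parse_runtime_request_py requested (parse_runtime_request_py requested)

-- ===== LEMMAS AND PROOFS =====

-- proof-only helper: first-underscore decomposition of a character list
def pvPartChars : List Char → List Char × Bool × List Char
  | [] => ([], false, [])
  | c :: rest =>
    if c = '_' then ([], true, rest)
    else
      let r := pvPartChars rest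
      (c :: r.1, r.2.1, r.2.2)

lemma pvPartChars_true (cs : List Char) (h t : List Char)
    (hp : pvPartChars cs = (h, true, t)) : cs = h ++ '_' :: t ∧ '_' ∉ h := by
  induction cs generalizing h t with
  | nil => simp [pvPartChars] at hp
  | cons c rest ih =>
    rcases hr : pvPartChars rest with ⟨h', f', t'⟩
    by_cases hc : c = '_'
    · simp [pvPartChars, hc] at hp
      obtain ⟨h1, h2⟩ := hp
      subst h1; subst h2
      simp [hc]
    · simp [pvPartChars, hc, hr] at hp
      obtain ⟨h1, h2, h3⟩ := hp
      obtain ⟨e1, e2⟩ := ih _ _ (by rw [hr, h2, h3])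
      subst h1
      have hc' : ('_' : Char) ≠ c := fun e => hc e.symm
      exact ⟨by simp [e1], by simp [hc', e2]⟩

lemma pvPartChars_false (cs : List Char) (h t : List Char)
    (hp : pvPartChars cs = (h, false, t)) : cs = h ∧ '_' ∉ cs := by
  induction cs generalizing h t with
  | nil =>
    simp [pvPartChars] at hp
    obtain ⟨h1, h2⟩ := hp
    subst h1; subst h2
    simp
  | cons c rest ih =>
    rcases hr : pvPartChars rest with ⟨h', f', t'⟩
    by_cases hc : c = '_'
    · simp [pvPartChars, hc] at hp
    · simp [pvPartChars, hc, hr] at hp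
      obtain ⟨h1, h2, h3⟩ := hp
      obtain ⟨e1, e2⟩ := ih _ _ (by rw [hr, h2, h3])
      subst h1
      have hc' : ('_' : Char) ≠ c := fun e => hc e.symm
      exact ⟨by simp [e1], by simp [hc', e2]⟩

-- a token "p_" is a prefix of "h_t" exactly when p = h (p and h underscore-free)
lemma pfx_iff (p h t : List Char) (hp : '_' ∉ p) (hh : '_' ∉ h) :
    (p ++ ['_']) <+: (h ++ '_' :: t) ↔ p = h := by
  induction p generalizing h with
  | nil =>
    cases h with
    | nil => simp
    | cons b h' =>
      simp only [List.nil_append, List.cons_append]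
      constructor
      · intro hpre
        rcases List.cons_prefix_cons.mp hpre with ⟨hb, _⟩
        exact absurd hb.symm (by simp at hh; tauto)
      · intro hcontra; exact absurd hcontra (by simp)
  | cons a p' ih =>
    cases h with
    | nil =>
      simp only [List.nil_append, List.cons_append]
      constructor
      · intro hpre
        rcases List.cons_prefix_cons.mp hpre with ⟨hb, _⟩
        exact absurd hb (by simp at hp; tauto)
      · intro hcontra; exact absurd hcontra (by simp)
    | cons b h' =>
      simp only [List.cons_append, List.cons_prefix_cons]
      have hp' : '_' ∉ p' := fun hx => hp (List.mem_cons_of_mem _ hx)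
      have hh' : '_' ∉ h' := fun hx => hh (List.mem_cons_of_mem _ hx)
      rw [ih h' hp' hh']
      simp

-- an underscore token is never a prefix of an underscore-free string
lemma pfx_none (p cs : List Char) (hcs : '_' ∉ cs) : ¬ (p ++ ['_']) <+: cs := by
  intro hpre
  rcases hpre with ⟨r, hr⟩
  apply hcs
  rw [← hr]
  simp

-- req[len(token):] is exactly the tail when req = h ++ '_' :: t
lemma slice_drop_suffix (req : String) (h t : List Char) (e1 : req.toList = h ++ '_' :: t)
    (n : Int) (hn : n = (h.length : Int) + 1) :
    PySem.Str.slice req (some n) none = String.ofList t := by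
  have hpos : (0 : Int) ≤ n := by rw [hn]; positivity
  rw [String.ext_iff, PySem.Str.toList_slice, PySem.Chars.slice_eq_listSlice,
    PySem.List.slice_from req.toList hpos, e1]
  have h2 : n.toNat = h.length + 1 := by rw [hn]; omega
  rw [h2, show h ++ '_' :: t = (h ++ ['_']) ++ t by simp,
    show h.length + 1 = (h ++ ['_']).length by simp, List.drop_left]
  simp

-- takeWhile (≠ '_') on an underscore-free list is the identity
lemma tw_self (cs : List Char) (hcs : '_' ∉ cs) :
    cs.takeWhile (fun c => !(c == '_')) = cs := by
  induction cs with
  | nil => rfl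
  | cons c rest ih =>
    have hc : ¬ c = '_' := by intro e; exact hcs (by simp [e])
    simp [List.takeWhile_cons, hc, ih (fun hx => hcs (List.mem_cons_of_mem _ hx))]

-- takeWhile (≠ '_') stops exactly at the first underscore
lemma tw_split (h t : List Char) (hh : '_' ∉ h) :
    (h ++ '_' :: t).takeWhile (fun c => !(c == '_')) = h := by
  induction h with
  | nil => simp [List.takeWhile_cons]
  | cons c rest ih =>
    have hc : ¬ c = '_' := by intro e; exact hh (by simp [e])
    simp [List.takeWhile_cons, hc, ih (fun hx => hh (List.mem_cons_of_mem _ hx))]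

-- the table misses every string that is not one of its 14 keys
lemma table_miss (s : String)
    (h1 : s ≠ "") (h2 : s ≠ "auto")
    (h3 : s ≠ "native") (h4 : s ≠ "onnx") (h5 : s ≠ "tensorrt")
    (h6 : s ≠ "native_cpu") (h7 : s ≠ "native_mps") (h8 : s ≠ "native_cuda") (h9 : s ≠ "native_rocm")
    (h10 : s ≠ "onnx_cpu") (h11 : s ≠ "onnx_mps") (h12 : s ≠ "onnx_cuda") (h13 : s ≠ "onnx_rocm")
    (h14 : s ≠ "tensorrt_cpu") (h15 : s ≠ "tensorrt_mps") (h16 : s ≠ "tensorrt_cuda") (h17 : s ≠ "tensorrt_rocm") :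
    pvTable.get? s = none := by
  apply (PySem.Dict.get?_eq_none_iff_contains _ _).mpr
  have hit : pvTable.items =
      [("", ("auto", none)), ("auto", ("auto", none)),
       ("native", ("native", none)), ("native_cpu", ("native", some "cpu")),
       ("native_mps", ("native", some "mps")), ("native_cuda", ("native", some "cuda:0")),
       ("native_rocm", ("native", some "cuda:0")),
       ("onnx", ("onnx", none)), ("onnx_cpu", ("onnx", some "cpu")),
       ("onnx_mps", ("onnx", some "mps")), ("onnx_cuda", ("onnx", some "cuda:0")),
       ("onnx_rocm", ("onnx", some "cuda:0")),
       ("tensorrt", ("tensorrt", none)), ("tensorrt_cpu", ("tensorrt", some "cpu")),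
       ("tensorrt_mps", ("tensorrt", some "mps")), ("tensorrt_cuda", ("tensorrt", some "cuda:0")),
       ("tensorrt_rocm", ("tensorrt", some "cuda:0"))] := rfl
  simp [PySem.Dict.contains, hit]
  tauto

-- the equality of the two bodies at the (shared) normalized request string
set_option maxHeartbeats 2000000 in
lemma pv_main (req : String) : pvDispatchA req = pvLookupB req := by
  by_cases e1 : req = ""
  · subst e1; decide
  by_cases e2 : req = "auto"
  · subst e2; decide
  by_cases e3 : req = "native"
  · subst e3; decide
  by_cases e4 : req = "onnx"
  · subst e4; decide
  by_cases e5 : req = "tensorrt"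
  · subst e5; decide
  by_cases e6 : req = "native_cpu"
  · subst e6; decide
  by_cases e7 : req = "native_mps"
  · subst e7; decide
  by_cases e8 : req = "native_cuda"
  · subst e8; decide
  by_cases e9 : req = "native_rocm"
  · subst e9; decide
  by_cases e10 : req = "onnx_cpu"
  · subst e10; decide
  by_cases e11 : req = "onnx_mps"
  · subst e11; decide
  by_cases e12 : req = "onnx_cuda"
  · subst e12; decide
  by_cases e13 : req = "onnx_rocm"
  · subst e13; decide
  by_cases e14 : req = "tensorrt_cpu"
  · subst e14; decide
  by_cases e15 : req = "tensorrt_mps"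
  · subst e15; decide
  by_cases e16 : req = "tensorrt_cuda"
  · subst e16; decide
  by_cases e17 : req = "tensorrt_rocm"
  · subst e17; decide
  -- table miss: B takes the fallback branch
  have hmiss : pvTable.get? req = none :=
    table_miss req e1 e2 e3 e4 e5 e6 e7 e8 e9 e10 e11 e12 e13 e14 e15 e16 e17
  have hb0 : (req == "") = false := beq_eq_false_iff_ne.mpr e1
  have hba : (req == "auto") = false := beq_eq_false_iff_ne.mpr e2
  have hbn : (req == "native") = false := beq_eq_false_iff_ne.mpr e3
  have hbo : (req == "onnx") = false := beq_eq_false_iff_ne.mpr e4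
  have hbt : (req == "tensorrt") = false := beq_eq_false_iff_ne.mpr e5
  delta pvDispatchA pvLookupB
  rw [hmiss]
  simp only [hb0, hba, hbn, hbo, hbt, Bool.or_self, Bool.or_false, Bool.false_or,
    Bool.false_eq_true, if_false]
  rcases hpc : pvPartChars req.toList with ⟨h, f, t⟩
  cases f with
  | false =>
    obtain ⟨hh, hnu⟩ := pvPartChars_false _ _ _ hpc
    -- no underscore: A's loop fails on every token, B's head is req itself
    have hswl : ∀ p : List Char, PySem.Chars.startswith req.toList (p ++ ['_']) = false :=
      fun p => Bool.eq_false_iff.mpr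
        (fun hc => pfx_none p req.toList hnu ((PySem.Chars.startswith_iff _ _).mp hc))
    have htw : req.toList.takeWhile (fun c => !(c == '_')) = req.toList := tw_self _ hnu
    have hof : String.ofList req.toList = req := by simp
    have hswn : PySem.Chars.startswith req.toList ['n', 'a', 't', 'i', 'v', 'e', '_'] = false :=
      hswl ['n', 'a', 't', 'i', 'v', 'e']
    have hswo : PySem.Chars.startswith req.toList ['o', 'n', 'n', 'x', '_'] = false :=
      hswl ['o', 'n', 'n', 'x']
    have hswt : PySem.Chars.startswith req.toList ['t', 'e', 'n', 's', 'o', 'r', 'r', 't', '_'] = false :=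
      hswl ['t', 'e', 'n', 's', 'o', 'r', 'r', 't']
    simp [pvLoopA, PySem.Str.startswith_eq, hswn, hswo, hswt, htw, hof, hbn, hbo, hbt]
  | true =>
    obtain ⟨hh, hnu⟩ := pvPartChars_true _ _ _ hpc
    have htw : req.toList.takeWhile (fun c => !(c == '_')) = h := by
      rw [hh]; exact tw_split h t hnu
    have hswb : ∀ p : String, '_' ∉ p.toList →
        PySem.Str.startswith req (p ++ "_") = decide (p.toList = h) := by
      intro p hp
      rw [PySem.Str.startswith_eq, String.toList_append,
        show ("_" : String).toList = ['_'] from rfl, Bool.eq_iff_iff,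
        PySem.Chars.startswith_iff, hh, pfx_iff _ _ _ hp hnu]
      simp
    have hswT : ∀ (p : String) (tok : List Char), '_' ∉ p.toList → p.toList = h →
        (p ++ "_").toList = tok → PySem.Chars.startswith req.toList tok = true := by
      intro p tok hp he htok
      have hx := hswb p hp
      rw [PySem.Str.startswith_eq, htok] at hx
      rw [hx]
      exact decide_eq_true he
    have hswF : ∀ (p : String) (tok : List Char), '_' ∉ p.toList → p.toList ≠ h →
        (p ++ "_").toList = tok → PySem.Chars.startswith req.toList tok = false := by
      intro p tok hp he htok
      have hx := hswb p hp
      rw [PySem.Str.startswith_eq, htok] at hx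
      rw [hx]
      exact decide_eq_false he
    by_cases hn : h = "native".toList
    · have hsufn : PySem.Str.slice req (some 7) none = String.ofList t :=
        slice_drop_suffix req h t (by rw [hh, hn]) 7 (by rw [hn]; decide)
      have htne : ∀ (s : String), req ≠ ("native_" ++ s) → String.ofList t ≠ s := by
        intro s hne
        intro e
        apply hne
        apply String.ext
        rw [hh, hn, String.toList_append, ← e,
            show ("native_" : String).toList = ['n','a','t','i','v','e','_'] from rfl]
        simp
      have s1 : PySem.Chars.startswith req.toList ['n','a','t','i','v','e','_'] = true :=
        hswT "native" _ (by decide) hn.symm rfl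
      simp [pvLoopA, s1, hn, hsufn, htw,
        htne "cpu" e6, htne "mps" e7, htne "cuda" e8, htne "rocm" e9]
    · by_cases ho : h = "onnx".toList
      · have hsufo : PySem.Str.slice req (some 5) none = String.ofList t :=
          slice_drop_suffix req h t (by rw [hh, ho]) 5 (by rw [ho]; decide)
        have htne : ∀ (s : String), req ≠ ("onnx_" ++ s) → String.ofList t ≠ s := by
          intro s hne
          intro e
          apply hne
          apply String.ext
          rw [hh, ho, String.toList_append, ← e,
            show ("onnx_" : String).toList = ['o','n','n','x','_'] from rfl]
          simp
        have s1 : PySem.Chars.startswith req.toList ['n','a','t','i','v','e','_'] = false :=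
          hswF "native" _ (by decide) (fun e => hn e.symm) rfl
        have s2 : PySem.Chars.startswith req.toList ['o','n','n','x','_'] = true :=
          hswT "onnx" _ (by decide) ho.symm rfl
        simp [pvLoopA, s1, s2, ho, hsufo, htw,
          htne "cpu" e10, htne "mps" e11, htne "cuda" e12, htne "rocm" e13]
      · by_cases ht2 : h = "tensorrt".toList
        · have hsuft : PySem.Str.slice req (some 9) none = String.ofList t :=
            slice_drop_suffix req h t (by rw [hh, ht2]) 9 (by rw [ht2]; decide)
          have htne : ∀ (s : String), req ≠ ("tensorrt_" ++ s) → String.ofList t ≠ s := by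
            intro s hne
            intro e
            apply hne
            apply String.ext
            rw [hh, ht2, String.toList_append, ← e,
              show ("tensorrt_" : String).toList = ['t','e','n','s','o','r','r','t','_'] from rfl]
            simp
          have s1 : PySem.Chars.startswith req.toList ['n','a','t','i','v','e','_'] = false :=
            hswF "native" _ (by decide) (fun e => hn e.symm) rfl
          have s2 : PySem.Chars.startswith req.toList ['o','n','n','x','_'] = false :=
            hswF "onnx" _ (by decide) (fun e => ho e.symm) rfl
          have s3 : PySem.Chars.startswith req.toList ['t','e','n','s','o','r','r','t','_'] = true :=
            hswT "tensorrt" _ (by decide) ht2.symm rfl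
          simp [pvLoopA, s1, s2, s3, ht2, hsuft, htw,
            htne "cpu" e14, htne "mps" e15, htne "cuda" e16, htne "rocm" e17]
        · have hb1 : (String.ofList h == "native") = false := by
            rw [beq_eq_false_iff_ne]
            intro e; exact hn (by simpa using congrArg String.toList e)
          have hb2 : (String.ofList h == "onnx") = false := by
            rw [beq_eq_false_iff_ne]
            intro e; exact ho (by simpa using congrArg String.toList e)
          have hb3 : (String.ofList h == "tensorrt") = false := by
            rw [beq_eq_false_iff_ne]
            intro e; exact ht2 (by simpa using congrArg String.toList e)
          have s1 : PySem.Chars.startswith req.toList ['n','a','t','i','v','e','_'] = false :=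
            hswF "native" _ (by decide) (fun e => hn e.symm) rfl
          have s2 : PySem.Chars.startswith req.toList ['o','n','n','x','_'] = false :=
            hswF "onnx" _ (by decide) (fun e => ho e.symm) rfl
          have s3 : PySem.Chars.startswith req.toList ['t','e','n','s','o','r','r','t','_'] = false :=
            hswF "tensorrt" _ (by decide) (fun e => ht2 e.symm) rfl
          simp [pvLoopA, s1, s2, s3, htw, hb1, hb2, hb3]

-- ===== VERDICT (by name: the statement is the Claim_ definition above) =====
theorem parse_runtime_request_py_spec : Claim_equal_parse_runtime_request_py := by
  intro requested _
  unfold Spec_parse_runtime_request_py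
  exact pv_main _
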